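-- pv_equiv track=rewrite | github.com/MessiHope/Tmall | src/3. MerchantPrediction/user_feature.py | daily_action_factor
-- ===== SOURCE A (Python) =====
-- def daily_action_factor(user_log):
--     # we assign weght by
--     # 8 -> purchase, 4-> add_to_cart,
--     # 2 -> add_to_favorite, 1-> click
--     weight_sum = 0
--     for item in user_log:
--         action_type = item[-1] if len(item[-1]) > 0 else None
--         if action_type is None:
--             continue
--         tmp = int(action_type)
--         sup = tmp
--         if tmp == 3: # add-to-favorite action
--             sup = 1
--         elif tmp == 2: # purchase action
--             sup = 3
--         elif tmp == 1: # add-to-cart action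
--             sup = 2
--         weight_sum = weight_sum + pow(2, sup)
--     return weight_sum
-- ===== SOURCE B (Python) =====
-- def daily_action_factor(user_log):
--     # Two-pass tabulate-then-weight: count distinct action codes once, then
--     # weight each distinct code by 2**sup (3->1, 2->3, 1->2, else identity).
--     codes = [item[-1] for item in user_log if item and item[-1]]
--     counts = {}
--     for c in codes:
--         counts[c] = counts.get(c, 0) + 1
--     weight_sum = 0
--     for code, cnt in counts.items():
--         tmp = int(code)
--         sup = {3: 1, 2: 3, 1: 2}.get(tmp, tmp)
--         weight_sum += cnt * pow(2, sup)
--     return weight_sum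
-- ===== Notes on version B (the rewrite author's own statement) =====
-- stated objective: alternative
-- what changed: Replaces A's single streaming per-row accumulation with a two-pass tabulate-then-weight decomposition: first a frequency dict over the distinct action-code strings (skipping empty items/codes), then one weighted pass over the distinct codes accumulating count * 2**sup.
import Mathlib
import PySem

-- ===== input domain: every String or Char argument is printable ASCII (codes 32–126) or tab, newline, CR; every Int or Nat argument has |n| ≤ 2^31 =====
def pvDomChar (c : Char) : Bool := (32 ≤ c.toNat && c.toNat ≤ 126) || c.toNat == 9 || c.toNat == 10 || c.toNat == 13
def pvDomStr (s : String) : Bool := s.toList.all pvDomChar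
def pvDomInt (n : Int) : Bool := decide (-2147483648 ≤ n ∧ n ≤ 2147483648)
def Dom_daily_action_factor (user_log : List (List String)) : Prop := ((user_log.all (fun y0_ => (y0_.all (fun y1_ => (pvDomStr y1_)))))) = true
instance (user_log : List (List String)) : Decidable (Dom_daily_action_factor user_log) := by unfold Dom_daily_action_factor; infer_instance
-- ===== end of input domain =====

-- B re-implements A as a tabulate-then-weight two-pass (frequency dict over distinct
-- codes, then one weighted pass); equivalence of return values is proved on Pre_.

-- ===== PORT A =====
-- streaming accumulation, row by row; 'pow(2, sup)' ported as '2 ^ sup.toNat'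
-- (exact under Pre_, which requires the parsed codes to be nonnegative)
def daily_action_factor (user_log : List (List String)) : Int :=
  user_log.foldl (fun weight_sum item =>
    match PySem.List.pyGet? item (-1) with
    | none => weight_sum  -- IndexError: excluded by Pre_
    | some last =>
      match (if PySem.Str.len last > 0 then some last else none) with
      | none => weight_sum  -- continue
      | some action_type =>
        match PySem.Int.ofStr? action_type with
        | none => weight_sum  -- ValueError: excluded by Pre_
        | some tmp =>
          let sup : Int := if tmp = 3 then 1 else if tmp = 2 then 3 else if tmp = 1 then 2 else tmp
          weight_sum + 2 ^ sup.toNat) 0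

-- ===== PORT B =====
def daily_action_factor_alt (user_log : List (List String)) : Int :=
  let codes := user_log.filterMap (fun item =>
    match item.getLast? with
    | none => none
    | some code => if code = "" then none else some code)
  let counts := codes.foldl (fun (d : PySem.Dict String Int) c =>
    d.insert c (d.getD c 0 + 1)) PySem.Dict.empty
  counts.items.foldl (fun weight_sum p =>
    match PySem.Int.ofStr? p.1 with
    | none => weight_sum  -- ValueError: excluded by Pre_
    | some tmp =>
      let sup : Int := if tmp = 3 then 1 else if tmp = 2 then 3 else if tmp = 1 then 2 else tmp
      weight_sum + p.2 * 2 ^ sup.toNat) 0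

-- ===== PRECONDITION & SPEC =====
-- Pre_ excludes exactly the inputs where Python A does not return an int: an empty
-- inner list (IndexError on item[-1]), a nonempty last string int() rejects
-- (ValueError), or one parsing to a negative int (pow(2, sup) returns a float).
def Pre_daily_action_factor (user_log : List (List String)) : Prop :=
  ∀ item ∈ user_log, item ≠ [] ∧
    (item.getLast?.getD "" = "" ∨
      (PySem.Int.ofStr? (item.getLast?.getD "")).any (fun t => decide (0 ≤ t)) = true)
instance (user_log : List (List String)) : Decidable (Pre_daily_action_factor user_log) := by
  unfold Pre_daily_action_factor; infer_instance
def pvWitness_daily_action_factor : List (List String) := [["1"], ["u", "2"], ["x", ""], [" 3 "]]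
def Spec_daily_action_factor (user_log : List (List String)) (out : Int) : Prop := out = daily_action_factor_alt user_log
instance (user_log : List (List String)) (out : Int) : Decidable (Spec_daily_action_factor user_log out) := by unfold Spec_daily_action_factor; infer_instance

-- ===== CLAIM (what is proved, stated in full; the proofs are below) =====
def Claim_equal_daily_action_factor : Prop := ∀ (user_log : List (List String)), Dom_daily_action_factor user_log → Pre_daily_action_factor user_log → Spec_daily_action_factor user_log (daily_action_factor user_log)

-- ===== LEMMAS AND PROOFS =====

-- per-code weight (0 where int() would fail; both ports skip such codes)
def permW (s : String) : Int :=
  match PySem.Int.ofStr? s with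
  | none => 0
  | some tmp => 2 ^ ((if tmp = 3 then (1 : Int) else if tmp = 2 then 3 else if tmp = 1 then 2 else tmp).toNat)

def codesOf (user_log : List (List String)) : List String :=
  user_log.filterMap (fun item =>
    match item.getLast? with
    | none => none
    | some code => if code = "" then none else some code)

def S2 (ps : List (String × Int)) : Int := (ps.map (fun p => p.2 * permW p.1)).sum

lemma foldl_addf {α : Type} (f : α → Int) (l : List α) : ∀ acc : Int,
    l.foldl (fun a x => a + f x) acc = acc + (l.map f).sum := by
  induction l with
  | nil => simp
  | cons x t ih => intro acc; simp [List.foldl_cons, ih, add_assoc]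

def gA (item : List String) : Int :=
  match item.getLast? with
  | none => 0
  | some last => if last = "" then 0 else permW last

lemma str_len_pos (s : String) (h : s ≠ "") : 0 < s.length := by
  have h2 : s.toList ≠ [] := by
    intro hc; apply h
    have := congrArg String.ofList hc
    simpa using this
  have h3 := List.length_pos_iff.mpr h2
  simpa using h3

lemma stepA_eq : (fun (weight_sum : Int) (item : List String) =>
      match PySem.List.pyGet? item (-1) with
      | none => weight_sum
      | some last =>
        match (if PySem.Str.len last > 0 then some last else none) with
        | none => weight_sum
        | some action_type =>
          match PySem.Int.ofStr? action_type with
          | none => weight_sum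
          | some tmp =>
            let sup : Int := if tmp = 3 then 1 else if tmp = 2 then 3 else if tmp = 1 then 2 else tmp
            weight_sum + 2 ^ sup.toNat)
    = fun acc item => acc + gA item := by
  funext acc item
  simp only [PySem.List.pyGet?_neg_one]
  rcases h : item.getLast? with _ | last
  · simp [gA, h]
  · by_cases he : last = ""
    · subst he
      simp [gA, h, PySem.Str.len_eq]
    · have hlen := str_len_pos last he
      rcases h2 : PySem.Int.ofStr? last with _ | tmp <;>
        simp [gA, h, he, permW, h2, PySem.Str.len_eq, hlen]

lemma gA_sum : ∀ ul : List (List String),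
    (ul.map gA).sum = ((codesOf ul).map permW).sum := by
  intro ul
  induction ul with
  | nil => simp [codesOf]
  | cons item t ih =>
    simp only [codesOf] at ih ⊢
    rcases h : item.getLast? with _ | last
    · simp [h, gA, ih]
    · by_cases he : last = "" <;>
        simp [h, gA, he, ih]

lemma A_eq (user_log : List (List String)) :
    daily_action_factor user_log = ((codesOf user_log).map permW).sum := by
  unfold daily_action_factor
  rw [stepA_eq, foldl_addf, gA_sum]
  simp

lemma replace_sum (c : String) : ∀ (ps : List (String × Int)),
    (ps.map Prod.fst).Nodup → ∀ cnt : Int, (c, cnt) ∈ ps →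
    S2 (ps.map (fun p => if p.1 == c then (c, cnt + 1) else p)) = S2 ps + permW c := by
  intro ps
  induction ps with
  | nil => intro _ cnt hm; simp at hm
  | cons p t ih =>
    intro hnd cnt hm
    simp only [List.map_cons, List.nodup_cons] at hnd
    by_cases hp : p.1 = c
    · have hcnt : p = (c, cnt) := by
        rcases List.mem_cons.mp hm with h1 | h1
        · exact h1.symm ▸ rfl
        · exact absurd (hp ▸ List.mem_map_of_mem (f := Prod.fst) h1) (by simpa [hp] using hnd.1)
      have htail : t.map (fun p => if p.1 == c then (c, cnt + 1) else p) = t := by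
        conv_rhs => rw [← List.map_id t]
        apply List.map_congr_left
        intro q hq
        have hq1 : q.1 ≠ c := fun hc => (hp ▸ hnd.1) (hc ▸ List.mem_map_of_mem (f := Prod.fst) hq)
        simp [hq1]
      simp only [S2, List.map_cons, List.sum_cons, htail, hcnt]
      simp only [beq_self_eq_true, if_true]
      ring
    · have hm' : (c, cnt) ∈ t := by
        rcases List.mem_cons.mp hm with h1 | h1
        · exact absurd (congrArg Prod.fst h1.symm) hp
        · exact h1
      have hthis := ih hnd.2 cnt hm'
      simp only [S2, List.map_cons, List.sum_cons] at hthis ⊢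
      rw [if_neg (by simpa using hp), hthis]
      ring

lemma insert_delta (d : PySem.Dict String Int) (hnd : d.keys.Nodup) (c : String) :
    S2 ((d.insert c (d.getD c 0 + 1)).items) = S2 d.items + permW c := by
  by_cases hc : d.contains c = true
  · rcases Option.isSome_iff_exists.mp (by rw [← PySem.Dict.contains_eq_isSome_get? d c]; exact hc) with ⟨v, hv⟩
    have hgd : d.getD c 0 = v := PySem.Dict.getD_of_get?_eq_some d 0 hv
    have hmem : (c, v) ∈ d.items := PySem.Dict.mem_items_of_get?_eq_some d hv
    rw [PySem.Dict.items_insert_of_contains d _ hc, hgd]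
    exact replace_sum c d.items hnd v hmem
  · have hc' : d.contains c = false := by simpa using hc
    rw [PySem.Dict.items_insert_of_not_contains d _ hc',
        PySem.Dict.getD_of_not_contains d 0 hc']
    simp [S2]

lemma counter_sum : ∀ (l : List String) (d : PySem.Dict String Int), d.keys.Nodup →
    S2 ((l.foldl (fun d c => d.insert c (d.getD c 0 + 1)) d).items)
      = S2 d.items + (l.map permW).sum := by
  intro l
  induction l with
  | nil => intro d _; simp
  | cons c t ih =>
    intro d hnd
    rw [List.foldl_cons, ih _ (PySem.Dict.nodup_keys_insert d c _ hnd), insert_delta d hnd c]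
    simp [add_assoc]

lemma stepB_eq : (fun (weight_sum : Int) (p : String × Int) =>
      match PySem.Int.ofStr? p.1 with
      | none => weight_sum
      | some tmp =>
        let sup : Int := if tmp = 3 then 1 else if tmp = 2 then 3 else if tmp = 1 then 2 else tmp
        weight_sum + p.2 * 2 ^ sup.toNat)
    = fun acc p => acc + p.2 * permW p.1 := by
  funext acc p
  rcases h2 : PySem.Int.ofStr? p.1 with _ | tmp <;> simp [permW, h2]

lemma B_eq (user_log : List (List String)) :
    daily_action_factor_alt user_log = ((codesOf user_log).map permW).sum := by
  unfold daily_action_factor_alt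
  rw [stepB_eq, foldl_addf]
  have := counter_sum (codesOf user_log) PySem.Dict.empty PySem.Dict.nodup_keys_empty
  simp only [codesOf, S2] at this
  rw [this]
  simp [codesOf, PySem.Dict.empty]

-- ===== VERDICT (by name: the statement is the Claim_ definition above) =====
theorem daily_action_factor_spec : Claim_equal_daily_action_factor := by
  intro user_log _ _
  unfold Spec_daily_action_factor
  rw [A_eq, B_eq]
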